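-- pv_equiv track=rewrite | github.com/jperezg86/TC4017.10_A01795188 | 4.2/p3/source/wordCount.py | es_palabra_valida
-- ===== SOURCE A (Python) =====
-- def es_palabra_valida(token: str) -> bool:
--     """Determina si un token es válido: letras, guiones o apóstrofes."""
--
--     if not token:
--         return False
--
--     tiene_letra = False
--     for caracter in token:
--         codigo = ord(caracter)
--         es_mayuscula = 65 <= codigo <= 90  # A-Z
--         es_minuscula = 97 <= codigo <= 122  # a-z
--         es_guion = caracter == "-"
--         es_apostrofe = caracter == "'"
--         if es_mayuscula or es_minuscula:
--             tiene_letra = True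
--             continue
--         if not (es_guion or es_apostrofe):
--             return False
--
--     return tiene_letra
-- ===== SOURCE B (Python) =====
-- _LETTERS = {chr(n) for n in range(65, 91)} | {chr(n) for n in range(97, 123)}
-- _ALLOWED = _LETTERS | {"-", "'"}
--
-- def es_palabra_valida(token: str) -> bool:
--     """Set algebra on the token's distinct characters: they must all lie in
--     the allowed alphabet and the token must meet the letter set."""
--     chars = set(token)
--     return chars <= _ALLOWED and not chars.isdisjoint(_LETTERS)
-- ===== Notes on version B (the rewrite author's own statement) =====
-- stated objective: faster
-- what changed: Replaces A's per-character Python loop with a flag and early return by set algebra: build set(token) once and decide validity by a subset test against a precomputed allowed-character set plus a non-disjointness test against the letter set.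
import Mathlib
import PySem

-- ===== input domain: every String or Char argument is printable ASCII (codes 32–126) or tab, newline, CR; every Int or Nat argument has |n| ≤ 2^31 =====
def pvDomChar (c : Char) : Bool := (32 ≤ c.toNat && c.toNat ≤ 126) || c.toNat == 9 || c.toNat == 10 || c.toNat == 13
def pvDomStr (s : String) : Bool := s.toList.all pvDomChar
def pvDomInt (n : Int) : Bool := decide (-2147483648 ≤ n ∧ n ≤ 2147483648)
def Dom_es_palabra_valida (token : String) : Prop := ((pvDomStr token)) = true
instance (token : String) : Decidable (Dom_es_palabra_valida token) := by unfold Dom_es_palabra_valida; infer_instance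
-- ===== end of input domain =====

-- B replaces A's flag-carrying per-character loop by set algebra on set(token):
-- a subset test against a precomputed allowed set plus a non-disjointness test
-- against the letter set; a timing run measured B faster (constant factor: C-level set ops).

-- ===== PORT A =====
-- A's for-loop: early return False on a disallowed char, tiene_letra flag threaded through
def pvLoopA : List Char → Bool → Bool
  | [], tiene_letra => tiene_letra
  | caracter :: rest, tiene_letra =>
    let codigo := caracter.toNat
    let es_mayuscula := decide (65 ≤ codigo) && decide (codigo ≤ 90)
    let es_minuscula := decide (97 ≤ codigo) && decide (codigo ≤ 122)
    let es_guion := caracter == '-'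
    let es_apostrofe := caracter == '\''
    if es_mayuscula || es_minuscula then pvLoopA rest true
    else if !(es_guion || es_apostrofe) then false
    else pvLoopA rest tiene_letra

def es_palabra_valida (token : String) : Bool :=
  if token.toList.isEmpty then false
  else pvLoopA token.toList false

-- ===== PORT B =====
-- chr(n) for 0 ≤ n < 0x110000 is exactly Char.ofNat n.toNat (all n here are 65..122)
def pvLetters : PySem.Set Char :=
  PySem.Set.union
    (PySem.Set.ofList ((PySem.List.pyRange 65 91 1).map (fun n => Char.ofNat n.toNat)))
    (PySem.Set.ofList ((PySem.List.pyRange 97 123 1).map (fun n => Char.ofNat n.toNat)))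

def pvAllowed : PySem.Set Char :=
  PySem.Set.union pvLetters (PySem.Set.ofList ['-', '\''])

def es_palabra_valida_alt (token : String) : Bool :=
  let chars := PySem.Set.ofList token.toList
  PySem.Set.issubset chars pvAllowed && !(PySem.Set.isdisjoint chars pvLetters)

-- ===== PRECONDITION & SPEC =====
def Spec_es_palabra_valida (token : String) (out : Bool) : Prop := out = es_palabra_valida_alt token
instance (token : String) (out : Bool) : Decidable (Spec_es_palabra_valida token out) := by unfold Spec_es_palabra_valida; infer_instance

-- ===== CLAIM =====
def Claim_equal_es_palabra_valida : Prop := ∀ (token : String), Dom_es_palabra_valida token → Spec_es_palabra_valida token (es_palabra_valida token)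

-- ===== LEMMAS AND PROOFS =====

-- predicates used only by the proofs: ASCII letter, allowed punctuation
def pvIsLet (c : Char) : Bool := (decide (65 ≤ c.toNat) && decide (c.toNat ≤ 90)) || (decide (97 ≤ c.toNat) && decide (c.toNat ≤ 122))
def pvIsPunct (c : Char) : Bool := c == '-' || c == '\''

lemma pvLoopA_cons (c : Char) (rest : List Char) (flag : Bool) :
    pvLoopA (c :: rest) flag =
      if pvIsLet c then pvLoopA rest true
      else if !pvIsPunct c then false
      else pvLoopA rest flag := rfl

-- A's loop returns: every char is letter-or-punct, and the flag was or becomes set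
lemma pvLoopA_char (l : List Char) (flag : Bool) :
    pvLoopA l flag = (l.all (fun c => pvIsLet c || pvIsPunct c) && (flag || l.any pvIsLet)) := by
  induction l generalizing flag with
  | nil => simp [pvLoopA]
  | cons c rest ih =>
    rw [pvLoopA_cons]
    cases hl : pvIsLet c
    · cases hp : pvIsPunct c
      · simp [hl, hp]
      · simp [hl, hp, ih]
    · simp [hl, ih]

-- membership in B's letter set is the ASCII-letter predicate
lemma pv_mem_letters (c : Char) : c ∈ pvLetters ↔ pvIsLet c = true := by
  unfold pvLetters
  rw [PySem.Set.mem_union, PySem.Set.mem_ofList, PySem.Set.mem_ofList]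
  simp only [List.mem_map, PySem.List.mem_pyRange_one, pvIsLet,
    Bool.or_eq_true, Bool.and_eq_true, decide_eq_true_eq]
  constructor
  · rintro (⟨n, ⟨h1, h2⟩, hn⟩ | ⟨n, ⟨h1, h2⟩, hn⟩) <;>
    · subst hn
      have hv : n.toNat.isValidChar := by
        constructor; omega
      rw [Char.toNat_ofNat, if_pos hv]
      first
        | exact Or.inl ⟨by omega, by omega⟩
        | exact Or.inr ⟨by omega, by omega⟩
  · rintro (⟨h1, h2⟩ | ⟨h1, h2⟩)
    · exact Or.inl ⟨(c.toNat : Int), ⟨by omega, by omega⟩, by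
        rw [Int.toNat_natCast]; exact Char.ofNat_toNat c⟩
    · exact Or.inr ⟨(c.toNat : Int), ⟨by omega, by omega⟩, by
        rw [Int.toNat_natCast]; exact Char.ofNat_toNat c⟩

lemma pv_mem_allowed (c : Char) : c ∈ pvAllowed ↔ (pvIsLet c || pvIsPunct c) = true := by
  unfold pvAllowed
  rw [PySem.Set.mem_union, PySem.Set.mem_ofList, pv_mem_letters]
  simp [pvIsPunct]

-- B computes the same conjunction as A's loop characterisation
lemma pv_alt_char (token : String) :
    es_palabra_valida_alt token =
      (token.toList.all (fun c => pvIsLet c || pvIsPunct c) && token.toList.any pvIsLet) := by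
  unfold es_palabra_valida_alt
  rw [Bool.eq_iff_iff]
  simp only [Bool.and_eq_true, Bool.not_eq_true', List.all_eq_true, List.any_eq_true]
  constructor
  · rintro ⟨hsub, hdis⟩
    rw [PySem.Set.issubset_iff] at hsub
    constructor
    · intro c hc
      exact (pv_mem_allowed c).1 (hsub c ((PySem.Set.mem_ofList _ _).2 hc))
    · by_contra hno
      push Not at hno
      have : PySem.Set.isdisjoint (PySem.Set.ofList token.toList) pvLetters = true := by
        rw [PySem.Set.isdisjoint_iff]
        intro x hx hlet
        exact hno x ((PySem.Set.mem_ofList _ _).1 hx) ((pv_mem_letters x).1 hlet)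
      simp [this] at hdis
  · rintro ⟨hall, c, hc, hlet⟩
    constructor
    · rw [PySem.Set.issubset_iff]
      intro x hx
      exact (pv_mem_allowed x).2 (hall x ((PySem.Set.mem_ofList _ _).1 hx))
    · rw [Bool.eq_false_iff]
      intro hd
      rw [PySem.Set.isdisjoint_iff] at hd
      exact hd c ((PySem.Set.mem_ofList _ _).2 hc) ((pv_mem_letters c).2 hlet)

-- ===== VERDICT =====
theorem es_palabra_valida_spec : Claim_equal_es_palabra_valida := by
  intro token _
  unfold Spec_es_palabra_valida es_palabra_valida
  rw [pv_alt_char, pvLoopA_char]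
  cases token.toList <;> simp
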